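-- pv_equiv track=rewrite | github.com/Olito-Labs/oliver-backend | app/refined_slide_patterns.py | get_pattern_for_request
-- ===== SOURCE A (Python) =====
-- def get_pattern_for_request(request: str) -> str:
--     """Determine the best pattern based on request content."""
--     request_lower = request.lower()
--
--     if any(word in request_lower for word in ['summary', 'executive', 'overview', 'key takeaways']):
--         return 'executive_summary'
--     elif any(word in request_lower for word in ['data', 'metrics', 'gauge', 'chart', 'percentage']):
--         return 'data_insight'
--     elif any(word in request_lower for word in ['compare', 'versus', 'vs', 'traditional vs', 'surface vs']):
--         return 'strategic_comparison'
--     elif any(word in request_lower for word in ['three', '3', 'pillars', 'capabilities', 'approaches']):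
--         return 'simple_three_pillar'
--     else:
--         return 'single_focus_message'
-- ===== SOURCE B (Python) =====
-- GROUPS = [
--     (['summary', 'executive', 'overview', 'key takeaways'], 'executive_summary'),
--     (['data', 'metrics', 'gauge', 'chart', 'percentage'], 'data_insight'),
--     (['compare', 'versus', 'vs', 'traditional vs', 'surface vs'], 'strategic_comparison'),
--     (['three', '3', 'pillars', 'capabilities', 'approaches'], 'simple_three_pillar'),
-- ]
-- LABELS = [label for _, label in GROUPS] + ['single_focus_message']
-- KEYWORDS = [(kw, i) for i, (kws, _) in enumerate(GROUPS) for kw in kws]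
--
-- def get_pattern_for_request(request: str) -> str:
--     """Determine the best pattern based on request content."""
--     s = request.lower()
--     best = len(GROUPS)
--     for i in range(len(s)):
--         for kw, idx in KEYWORDS:
--             if idx < best and s.startswith(kw, i):
--                 best = idx
--     return LABELS[best]
-- ===== Notes on version B (the rewrite author's own statement) =====
-- stated objective: alternative
-- what changed: Instead of A's four separate any-substring scans tried ladder-style, B makes one left-to-right pass over the lowercased text, testing every keyword for a match starting at each position and accumulating the minimum matching rule index, then indexes a label table; the default is index 4.
import Mathlib
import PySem

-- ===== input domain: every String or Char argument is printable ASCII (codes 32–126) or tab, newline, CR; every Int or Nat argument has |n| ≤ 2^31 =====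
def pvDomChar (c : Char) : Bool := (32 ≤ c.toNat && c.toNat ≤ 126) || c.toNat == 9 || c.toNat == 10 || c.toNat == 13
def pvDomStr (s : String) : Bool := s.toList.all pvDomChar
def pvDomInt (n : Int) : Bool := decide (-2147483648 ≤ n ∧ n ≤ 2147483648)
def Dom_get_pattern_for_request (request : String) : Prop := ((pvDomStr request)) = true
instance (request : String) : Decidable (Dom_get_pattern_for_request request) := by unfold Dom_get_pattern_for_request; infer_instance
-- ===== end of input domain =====

-- B replaces A's four per-keyword substring scans by a single left-to-right scan of the
-- lowercased text that tests every keyword at each position and keeps the best (lowest)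
-- rule index seen; same priority order and default (objective: alternative).


-- ===== PORT A =====
-- literal port of A: if/elif ladder of any-substring tests over the lowercased request
def get_pattern_for_request (request : String) : String :=
  let request_lower := PySem.Str.lower request
  if (["summary", "executive", "overview", "key takeaways"].any
      (fun word => PySem.Str.isIn word request_lower)) then "executive_summary"
  else if (["data", "metrics", "gauge", "chart", "percentage"].any
      (fun word => PySem.Str.isIn word request_lower)) then "data_insight"
  else if (["compare", "versus", "vs", "traditional vs", "surface vs"].any
      (fun word => PySem.Str.isIn word request_lower)) then "strategic_comparison"
  else if (["three", "3", "pillars", "capabilities", "approaches"].any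
      (fun word => PySem.Str.isIn word request_lower)) then "simple_three_pillar"
  else "single_focus_message"

-- ===== PORT B =====
-- B: one scan of the text; at each position every (keyword, rule-index) pair is tested
-- for a match starting there and the minimum matching rule index is accumulated.
def pvLabels : List String :=
  ["executive_summary", "data_insight", "strategic_comparison",
   "simple_three_pillar", "single_focus_message"]

def pvKeywords : List (List Char × Nat) :=
  [ ("summary".toList, 0), ("executive".toList, 0), ("overview".toList, 0), ("key takeaways".toList, 0),
    ("data".toList, 1), ("metrics".toList, 1), ("gauge".toList, 1), ("chart".toList, 1), ("percentage".toList, 1),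
    ("compare".toList, 2), ("versus".toList, 2), ("vs".toList, 2), ("traditional vs".toList, 2), ("surface vs".toList, 2),
    ("three".toList, 3), ("3".toList, 3), ("pillars".toList, 3), ("capabilities".toList, 3), ("approaches".toList, 3) ]

-- one position: try every keyword at the front of the current suffix, keep the least index
def pvStep (s : List Char) (b : Nat) : Nat :=
  pvKeywords.foldl (fun b p => if p.2 < b && p.1.isPrefixOf s then p.2 else b) b

-- the scan over all positions (suffixes) of the text
def pvScan : List Char → Nat → Nat
  | [], best => best
  | c :: rest, best => pvScan rest (pvStep (c :: rest) best)

def get_pattern_for_request_alt (request : String) : String :=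
  pvLabels.getD (pvScan (PySem.Str.lower request).toList 4) "single_focus_message"

-- ===== PRECONDITION & SPEC =====
def Spec_get_pattern_for_request (request : String) (out : String) : Prop := out = get_pattern_for_request_alt request
instance (request : String) (out : String) : Decidable (Spec_get_pattern_for_request request out) := by unfold Spec_get_pattern_for_request; infer_instance

-- ===== CLAIM (what is proved, stated in full; the proofs are below) =====
def Claim_equal_get_pattern_for_request : Prop := ∀ (request : String), Dom_get_pattern_for_request request → Spec_get_pattern_for_request request (get_pattern_for_request request)

-- ===== LEMMAS AND PROOFS =====

theorem pvScan_cons (c : Char) (rest : List Char) (b : Nat) :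
    pvScan (c :: rest) b = pvScan rest (pvStep (c :: rest) b) := rfl

-- the position fold (over any keyword list) never increases the accumulator
theorem pvFold_le (K : List (List Char × Nat)) (s : List Char) (b : Nat) :
    K.foldl (fun b p => if p.2 < b && p.1.isPrefixOf s then p.2 else b) b ≤ b := by
  induction K generalizing b with
  | nil => simp
  | cons p K ih =>
      simp only [List.foldl_cons]
      refine le_trans (ih _) ?_
      split <;> rename_i h
      · simp only [Bool.and_eq_true, decide_eq_true_eq] at h; omega
      · exact le_rfl

-- if some listed keyword matches at the front, the fold is ≤ its index
theorem pvFold_le_of_mem (K : List (List Char × Nat)) (s kw : List Char) (i : Nat)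
    (hmem : (kw, i) ∈ K) (hpre : kw <+: s) (b : Nat) :
    K.foldl (fun b p => if p.2 < b && p.1.isPrefixOf s then p.2 else b) b ≤ i := by
  induction K generalizing b with
  | nil => cases hmem
  | cons p K ih =>
      rcases List.mem_cons.mp hmem with h | h
      · subst h
        simp only [List.foldl_cons]
        refine le_trans (pvFold_le _ _ _) ?_
        by_cases hib : i < b
        · simp [hib, List.isPrefixOf_iff_prefix.mpr hpre]
        · simp only [hib, decide_false, Bool.false_and, Bool.false_eq_true, if_false]; omega
      · exact ih h _

-- the fold either keeps b or returns the index of a keyword matching at the front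
theorem pvFold_cases (K : List (List Char × Nat)) (s : List Char) (b : Nat) :
    K.foldl (fun b p => if p.2 < b && p.1.isPrefixOf s then p.2 else b) b = b ∨
    ∃ p ∈ K, K.foldl (fun b p => if p.2 < b && p.1.isPrefixOf s then p.2 else b) b = p.2 ∧ p.1 <+: s := by
  induction K generalizing b with
  | nil => exact Or.inl rfl
  | cons p K ih =>
      simp only [List.foldl_cons]
      rcases ih (if p.2 < b && p.1.isPrefixOf s then p.2 else b) with h | ⟨q, hq, hqe, hqp⟩
      · rw [h]
        split <;> rename_i hc
        · simp only [Bool.and_eq_true, decide_eq_true_eq] at hc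
          exact Or.inr ⟨p, List.mem_cons_self .., rfl, List.isPrefixOf_iff_prefix.mp hc.2⟩
        · exact Or.inl rfl
      · exact Or.inr ⟨q, List.mem_cons_of_mem _ hq, hqe, hqp⟩

theorem pvStep_le (s : List Char) (b : Nat) : pvStep s b ≤ b := pvFold_le _ _ _

theorem pvStep_le_of_mem (s kw : List Char) (i : Nat)
    (hmem : (kw, i) ∈ pvKeywords) (hpre : kw <+: s) (b : Nat) : pvStep s b ≤ i :=
  pvFold_le_of_mem _ _ _ _ hmem hpre _

theorem pvStep_cases (s : List Char) (b : Nat) :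
    pvStep s b = b ∨ ∃ p ∈ pvKeywords, pvStep s b = p.2 ∧ p.1 <+: s :=
  pvFold_cases _ _ _

-- the scan never increases the accumulator
theorem pvScan_le (l : List Char) (b : Nat) : pvScan l b ≤ b := by
  induction l generalizing b with
  | nil => simp [pvScan]
  | cons c rest ih => rw [pvScan_cons]; exact le_trans (ih _) (pvStep_le _ _)

-- upper bound: a keyword occurring anywhere bounds the scan by its index
theorem pvScan_le_of_match (l kw : List Char) (i : Nat)
    (hne : kw ≠ []) (hmem : (kw, i) ∈ pvKeywords) :
    ∀ b, (∃ j, kw <+: l.drop j) → pvScan l b ≤ i := by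
  induction l with
  | nil =>
      intro b h
      obtain ⟨j, hj⟩ := h
      simp only [List.drop_nil] at hj
      exact absurd (List.prefix_nil.mp hj) hne
  | cons c rest ih =>
      intro b h
      obtain ⟨j, hj⟩ := h
      rw [pvScan_cons]
      cases j with
      | zero => exact le_trans (pvScan_le _ _) (pvStep_le_of_mem _ _ _ hmem hj _)
      | succ j => exact ih _ ⟨j, by simpa using hj⟩

-- the scan either keeps b or returns the index of a keyword occurring somewhere
theorem pvScan_cases (l : List Char) (b : Nat) :
    pvScan l b = b ∨ ∃ p ∈ pvKeywords, pvScan l b = p.2 ∧ ∃ j, p.1 <+: l.drop j := by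
  induction l generalizing b with
  | nil => exact Or.inl rfl
  | cons c rest ih =>
      rw [pvScan_cons]
      rcases ih (pvStep (c :: rest) b) with h | ⟨p, hp, hpe, j, hpj⟩
      · rw [h]
        rcases pvStep_cases (c :: rest) b with h2 | ⟨p, hp, hpe, hpp⟩
        · exact Or.inl h2
        · exact Or.inr ⟨p, hp, hpe, 0, by simpa using hpp⟩
      · exact Or.inr ⟨p, hp, hpe, j + 1, by simpa using hpj⟩

-- group 0 matched somewhere: the scan is bounded by 0
theorem pvScanLeG0 (l : List Char)
    (h : (["summary", "executive", "overview", "key takeaways"].any fun w => PySem.Chars.isIn w.toList l) = true) :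
    pvScan l 4 ≤ 0 := by
  rw [List.any_eq_true] at h
  obtain ⟨w, hw, hin⟩ := h
  have hj : ∃ j, w.toList <+: l.drop j :=
    (PySem.Chars.exists_prefix_drop_iff_isIn _ _).mpr hin
  fin_cases hw <;> exact pvScan_le_of_match _ _ _ (by decide) (by decide) 4 hj

-- no keyword of group 0 occurs: the scan cannot land on 0
theorem pvScanNeG0 (l : List Char)
    (h : (["summary", "executive", "overview", "key takeaways"].any fun w => PySem.Chars.isIn w.toList l) = false) :
    pvScan l 4 ≠ 0 := by
  intro he
  rcases pvScan_cases l 4 with h4 | ⟨p, hp, hpe, j, hpj⟩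
  · omega
  · have hin := (PySem.Chars.exists_prefix_drop_iff_isIn p.1 l).mp ⟨j, hpj⟩
    rw [List.any_eq_false] at h
    fin_cases hp <;> simp_all

-- group 1 matched somewhere: the scan is bounded by 1
theorem pvScanLeG1 (l : List Char)
    (h : (["data", "metrics", "gauge", "chart", "percentage"].any fun w => PySem.Chars.isIn w.toList l) = true) :
    pvScan l 4 ≤ 1 := by
  rw [List.any_eq_true] at h
  obtain ⟨w, hw, hin⟩ := h
  have hj : ∃ j, w.toList <+: l.drop j :=
    (PySem.Chars.exists_prefix_drop_iff_isIn _ _).mpr hin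
  fin_cases hw <;> exact pvScan_le_of_match _ _ _ (by decide) (by decide) 4 hj

-- no keyword of group 1 occurs: the scan cannot land on 1
theorem pvScanNeG1 (l : List Char)
    (h : (["data", "metrics", "gauge", "chart", "percentage"].any fun w => PySem.Chars.isIn w.toList l) = false) :
    pvScan l 4 ≠ 1 := by
  intro he
  rcases pvScan_cases l 4 with h4 | ⟨p, hp, hpe, j, hpj⟩
  · omega
  · have hin := (PySem.Chars.exists_prefix_drop_iff_isIn p.1 l).mp ⟨j, hpj⟩
    rw [List.any_eq_false] at h
    fin_cases hp <;> simp_all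

-- group 2 matched somewhere: the scan is bounded by 2
theorem pvScanLeG2 (l : List Char)
    (h : (["compare", "versus", "vs", "traditional vs", "surface vs"].any fun w => PySem.Chars.isIn w.toList l) = true) :
    pvScan l 4 ≤ 2 := by
  rw [List.any_eq_true] at h
  obtain ⟨w, hw, hin⟩ := h
  have hj : ∃ j, w.toList <+: l.drop j :=
    (PySem.Chars.exists_prefix_drop_iff_isIn _ _).mpr hin
  fin_cases hw <;> exact pvScan_le_of_match _ _ _ (by decide) (by decide) 4 hj

-- no keyword of group 2 occurs: the scan cannot land on 2
theorem pvScanNeG2 (l : List Char)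
    (h : (["compare", "versus", "vs", "traditional vs", "surface vs"].any fun w => PySem.Chars.isIn w.toList l) = false) :
    pvScan l 4 ≠ 2 := by
  intro he
  rcases pvScan_cases l 4 with h4 | ⟨p, hp, hpe, j, hpj⟩
  · omega
  · have hin := (PySem.Chars.exists_prefix_drop_iff_isIn p.1 l).mp ⟨j, hpj⟩
    rw [List.any_eq_false] at h
    fin_cases hp <;> simp_all

-- group 3 matched somewhere: the scan is bounded by 3
theorem pvScanLeG3 (l : List Char)
    (h : (["three", "3", "pillars", "capabilities", "approaches"].any fun w => PySem.Chars.isIn w.toList l) = true) :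
    pvScan l 4 ≤ 3 := by
  rw [List.any_eq_true] at h
  obtain ⟨w, hw, hin⟩ := h
  have hj : ∃ j, w.toList <+: l.drop j :=
    (PySem.Chars.exists_prefix_drop_iff_isIn _ _).mpr hin
  fin_cases hw <;> exact pvScan_le_of_match _ _ _ (by decide) (by decide) 4 hj

-- no keyword of group 3 occurs: the scan cannot land on 3
theorem pvScanNeG3 (l : List Char)
    (h : (["three", "3", "pillars", "capabilities", "approaches"].any fun w => PySem.Chars.isIn w.toList l) = false) :
    pvScan l 4 ≠ 3 := by
  intro he
  rcases pvScan_cases l 4 with h4 | ⟨p, hp, hpe, j, hpj⟩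
  · omega
  · have hin := (PySem.Chars.exists_prefix_drop_iff_isIn p.1 l).mp ⟨j, hpj⟩
    rw [List.any_eq_false] at h
    fin_cases hp <;> simp_all

-- ===== VERDICT (by name: the statement is the Claim_ definition above) =====
theorem get_pattern_for_request_spec : Claim_equal_get_pattern_for_request := by
  intro request _
  unfold Spec_get_pattern_for_request get_pattern_for_request get_pattern_for_request_alt
  simp only [PySem.Str.isIn_eq]
  set l := (PySem.Str.lower request).toList with hl
  have h4 : pvScan l 4 ≤ 4 := pvScan_le l 4
  by_cases h0 : (["summary", "executive", "overview", "key takeaways"].any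
      fun w => PySem.Chars.isIn w.toList l) = true
  · have hle := pvScanLeG0 l h0
    have hs : pvScan l 4 = 0 := by omega
    rw [if_pos h0, hs]
    rfl
  · have hne0 := pvScanNeG0 l (Bool.eq_false_iff.mpr h0)
    rw [if_neg h0]
    by_cases h1 : (["data", "metrics", "gauge", "chart", "percentage"].any
        fun w => PySem.Chars.isIn w.toList l) = true
    · have hle := pvScanLeG1 l h1
      have hs : pvScan l 4 = 1 := by omega
      rw [if_pos h1, hs]
      rfl
    · have hne1 := pvScanNeG1 l (Bool.eq_false_iff.mpr h1)
      rw [if_neg h1]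
      by_cases h2 : (["compare", "versus", "vs", "traditional vs", "surface vs"].any
          fun w => PySem.Chars.isIn w.toList l) = true
      · have hle := pvScanLeG2 l h2
        have hs : pvScan l 4 = 2 := by omega
        rw [if_pos h2, hs]
        rfl
      · have hne2 := pvScanNeG2 l (Bool.eq_false_iff.mpr h2)
        rw [if_neg h2]
        by_cases h3 : (["three", "3", "pillars", "capabilities", "approaches"].any
            fun w => PySem.Chars.isIn w.toList l) = true
        · have hle := pvScanLeG3 l h3
          have hs : pvScan l 4 = 3 := by omega
          rw [if_pos h3, hs]
          rfl
        · have hne3 := pvScanNeG3 l (Bool.eq_false_iff.mpr h3)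
          have hs : pvScan l 4 = 4 := by omega
          rw [if_neg h3, hs]
          rfl
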